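-- pv_equiv track=rewrite | github.com/dqc-community/DISQCO | src/disqco/utils/qiskit_to_op_list.py | find_max_interactions
-- ===== SOURCE A (Python) =====
-- def find_max_interactions(qpu_info):
--     max_pairs_qpu = []
--     for n in range(len(qpu_info)):
--         if qpu_info[n] % 2 == 1:
--             max_pairs_qpu.append((qpu_info[n]-1)//2)
--         else:
--             max_pairs_qpu.append(qpu_info[n]//2)
--     max_pairs = sum(max_pairs_qpu)
--     return max_pairs
-- ===== SOURCE B (Python) =====
-- def find_max_interactions(qpu_info):
--     counts = {}
--     for q in qpu_info:
--         counts[q] = counts.get(q, 0) + 1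
--     return sum((v // 2) * c for v, c in counts.items())
-- ===== Notes on version B (the rewrite author's own statement) =====
-- stated objective: alternative
-- what changed: B groups the list into a value->multiplicity dictionary (Counter-style) and sums (v//2)*count over the distinct values, instead of flooring every element into an intermediate list and summing it; correctness rests on the multiset identity sum_x f(x) = sum_{distinct v} f(v)*count(v).
import Mathlib
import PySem

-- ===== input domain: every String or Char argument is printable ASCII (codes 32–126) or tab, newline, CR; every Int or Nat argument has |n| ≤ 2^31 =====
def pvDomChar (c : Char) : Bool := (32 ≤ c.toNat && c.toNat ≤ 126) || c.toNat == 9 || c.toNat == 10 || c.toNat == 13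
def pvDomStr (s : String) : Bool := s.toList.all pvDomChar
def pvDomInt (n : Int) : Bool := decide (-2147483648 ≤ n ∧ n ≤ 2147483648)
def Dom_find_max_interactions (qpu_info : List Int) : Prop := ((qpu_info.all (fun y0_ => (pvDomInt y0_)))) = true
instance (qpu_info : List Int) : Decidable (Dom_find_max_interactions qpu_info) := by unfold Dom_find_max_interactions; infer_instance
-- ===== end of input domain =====

-- B groups the list into a value->multiplicity dictionary and sums (v//2)*count over distinct values, instead of flooring each element into a list and summing it.


-- ===== PORT A =====
def find_max_interactions (qpu_info : List Int) : Int :=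
  let max_pairs_qpu : List Int :=
    (PySem.List.pyRange 0 qpu_info.length 1).foldl
      (fun acc n =>
        if PySem.Int.mod (PySem.List.pyGetD qpu_info n 0) 2 = 1 then
          acc ++ [PySem.Int.floordiv (PySem.List.pyGetD qpu_info n 0 - 1) 2]
        else
          acc ++ [PySem.Int.floordiv (PySem.List.pyGetD qpu_info n 0) 2]) []
  let max_pairs := max_pairs_qpu.sum
  max_pairs

-- ===== PORT B =====
def find_max_interactions_alt (qpu_info : List Int) : Int :=
  let counts : PySem.Dict Int Int :=
    qpu_info.foldl (fun d q => d.insert q (d.getD q 0 + 1)) PySem.Dict.empty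
  (counts.items.map (fun p => PySem.Int.floordiv p.1 2 * p.2)).sum

-- ===== PRECONDITION & SPEC =====
def Spec_find_max_interactions (qpu_info : List Int) (out : Int) : Prop := out = find_max_interactions_alt qpu_info
instance (qpu_info : List Int) (out : Int) : Decidable (Spec_find_max_interactions qpu_info out) := by unfold Spec_find_max_interactions; infer_instance

-- ===== CLAIM =====
def Claim_equal_find_max_interactions : Prop := ∀ (qpu_info : List Int), Dom_find_max_interactions qpu_info → Spec_find_max_interactions qpu_info (find_max_interactions qpu_info)

-- ===== LEMMAS AND PROOFS =====

-- per-element value A appends, seen as a pure floor division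
def pvHalf (q : Int) : Int := PySem.Int.floordiv q 2

theorem pvHalf_odd (q : Int) (h : PySem.Int.mod q 2 = 1) :
    PySem.Int.floordiv (q - 1) 2 = pvHalf q := by
  have hq := PySem.Int.floordiv_mul_add_mod q 2
  rw [h] at hq
  unfold pvHalf
  rw [PySem.Int.floordiv_eq_iff_of_pos (by omega)]
  omega

theorem pvHalf_branch (q : Int) :
    (if PySem.Int.mod q 2 = 1 then PySem.Int.floordiv (q - 1) 2
     else PySem.Int.floordiv q 2) = pvHalf q := by
  split_ifs with h
  · exact pvHalf_odd q h
  · rfl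

-- indexed map over range 0..len equals a direct map over the list
theorem pv_map_range_getD (xs : List Int) (g : Int → Int) :
    (List.range xs.length).map (fun k => g (xs.getD k 0)) = xs.map g := by
  induction xs with
  | nil => rfl
  | cons a t ih =>
      simp only [List.length_cons, List.range_succ_eq_map, List.map_cons, List.map_map]
      simp only [List.getD_cons_zero, List.cons.injEq, true_and]
      rw [← ih]
      rfl

theorem pvA_eq (xs : List Int) :
    find_max_interactions xs = (xs.map pvHalf).sum := by
  unfold find_max_interactions
  simp only []
  rw [show (fun (acc : List Int) (n : Int) =>
        if PySem.Int.mod (PySem.List.pyGetD xs n 0) 2 = 1 then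
          acc ++ [PySem.Int.floordiv (PySem.List.pyGetD xs n 0 - 1) 2]
        else
          acc ++ [PySem.Int.floordiv (PySem.List.pyGetD xs n 0) 2])
      = (fun acc n => acc ++ [pvHalf (PySem.List.pyGetD xs n 0)]) from by
        funext acc n
        rw [← pvHalf_branch (PySem.List.pyGetD xs n 0)]
        split_ifs with h <;> rfl]
  rw [PySem.List.foldl_append_singleton_eq_map]
  rw [PySem.List.pyRange_one]
  simp only [Int.sub_zero, Int.toNat_natCast, List.map_map, List.nil_append]
  rw [show ((fun n => pvHalf (PySem.List.pyGetD xs n 0)) ∘ fun k : Nat => ((0 : Int) + (k : Int)))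
        = (fun k : Nat => pvHalf (xs.getD k 0)) from by
      funext k
      simp [Function.comp, PySem.List.pyGetD_natCast]]
  rw [pv_map_range_getD]

-- over a duplicate-free list containing a, the 'if k = a' indicator sum collapses to one term
theorem pv_sum_indicator (s : List Int) (a : Int) (c : Int)
    (hnd : s.Nodup) (ha : a ∈ s) :
    (s.map (fun k => if k = a then c else 0)).sum = c := by
  induction s with
  | nil => cases ha
  | cons x t ih =>
      by_cases hx : x = a
      · subst hx
        have hxt : x ∉ t := (List.nodup_cons.mp hnd).1
        have h0 : (t.map (fun k => if k = x then c else 0)).sum = 0 := by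
          rw [List.sum_eq_zero]
          intro y hy
          obtain ⟨k, hk, rfl⟩ := List.mem_map.mp hy
          simp [show k ≠ x from fun h => hxt (h ▸ hk)]
        simp [h0]
      · have hat : a ∈ t := by
          rcases List.mem_cons.mp ha with h | h
          · exact absurd h.symm hx
          · exact h
        simp only [List.map_cons, List.sum_cons, if_neg hx, zero_add]
        exact ih (List.nodup_cons.mp hnd).2 hat

-- multiset identity: sum of f over xs = sum over a duplicate-free superset of f(k)*count(k)
theorem pv_sum_count (f : Int → Int) (xs s : List Int)
    (hnd : s.Nodup) (hsub : ∀ x ∈ xs, x ∈ s) :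
    (s.map (fun k => f k * (xs.count k : Int))).sum = (xs.map f).sum := by
  induction xs with
  | nil => simp
  | cons a t ih =>
      have ha : a ∈ s := hsub a List.mem_cons_self
      have ht : ∀ x ∈ t, x ∈ s := fun x hx => hsub x (List.mem_cons_of_mem a hx)
      have hsplit : (fun k => f k * ((a :: t).count k : Int))
          = fun k => f k * (t.count k : Int) + (if k = a then f a else 0) := by
        funext k
        by_cases h : k = a
        · subst h; simp; ring
        · simp [List.count_cons, h]; omega
      rw [hsplit, List.sum_map_add, ih ht, pv_sum_indicator s a (f a) hnd ha]
      simp [add_comm]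

theorem pvB_eq (xs : List Int) :
    find_max_interactions_alt xs = (xs.map pvHalf).sum := by
  unfold find_max_interactions_alt
  rw [PySem.Dict.foldl_insert_getD_add_one_eq_counter]
  show (List.map (fun p : Int × Int => PySem.Int.floordiv p.1 2 * p.2)
      (PySem.Dict.counter xs).items).sum = _
  rw [PySem.Dict.items_counter, List.map_map]
  have hc : ((fun p : Int × Int => PySem.Int.floordiv p.1 2 * p.2) ∘
      fun k => (k, (xs.count k : Int))) = fun k => pvHalf k * (xs.count k : Int) := rfl
  rw [hc]
  exact pv_sum_count pvHalf xs (PySem.Set.ofList xs)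
    (PySem.Set.nodup_ofList xs) (fun x hx => (PySem.Set.mem_ofList xs x).mpr hx)

-- ===== VERDICT =====
theorem find_max_interactions_spec : Claim_equal_find_max_interactions := by
  intro xs _
  unfold Spec_find_max_interactions
  rw [pvA_eq, pvB_eq]
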